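-- pv_equiv track=rewrite | github.com/Thrigger/advent_of_code | 2024/python/d7_1.py | equal_to_goal
-- ===== SOURCE A (Python) =====
-- def equal_to_goal(goal, vs):
--     if len(vs) == 1 and goal == vs[0]:
--         return True
--     elif len(vs) == 1:
--         return False
--
--     a = [vs[0]+vs[1]]
--     m = [vs[0]*vs[1]]
--     if len(vs) > 2:
--         a += vs[2:]
--         m += vs[2:]
--     return equal_to_goal(goal, a) or equal_to_goal(goal, m)
-- ===== SOURCE B (Python) =====
-- def equal_to_goal(goal, vs):
--     reach = {vs[0]}
--     for v in vs[1:]: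
--         reach = {x + v for x in reach} | {x * v for x in reach}
--     return goal in reach
-- ===== Notes on version B (the rewrite author's own statement) =====
-- stated objective: simpler
-- what changed: Replaces the branching recursion (two recursive calls per element) with a single forward loop that maintains a set of reachable partial results and checks membership at the end.
import Mathlib
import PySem

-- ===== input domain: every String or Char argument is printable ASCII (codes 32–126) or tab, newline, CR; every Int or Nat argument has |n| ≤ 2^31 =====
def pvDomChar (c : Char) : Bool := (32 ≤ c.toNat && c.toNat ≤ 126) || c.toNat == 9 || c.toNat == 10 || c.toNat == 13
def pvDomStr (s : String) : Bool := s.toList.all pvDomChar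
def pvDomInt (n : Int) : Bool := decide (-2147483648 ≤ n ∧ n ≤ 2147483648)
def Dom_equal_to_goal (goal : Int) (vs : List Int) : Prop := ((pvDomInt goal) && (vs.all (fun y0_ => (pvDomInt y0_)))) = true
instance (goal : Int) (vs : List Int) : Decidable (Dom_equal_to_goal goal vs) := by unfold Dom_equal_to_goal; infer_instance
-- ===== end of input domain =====

-- B replaces A's two-way recursion with one forward pass over the list maintaining
-- the set of reachable partial results (simpler: a single loop plus a membership test).


-- ===== PORT A =====
-- literal transliteration of A; on vs = [] Python raises IndexError (vs[0]) — excluded by Pre_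
def equal_to_goal (goal : Int) (vs : List Int) : Bool :=
  match vs with
  | [] => false
  | [v] => decide (goal = v)
  | v0 :: v1 :: rest =>
      -- a = [vs[0]+vs[1]] (+ vs[2:]);  m = [vs[0]*vs[1]] (+ vs[2:])
      equal_to_goal goal ((v0 + v1) :: rest) || equal_to_goal goal ((v0 * v1) :: rest)
termination_by vs.length

-- ===== PORT B =====
-- reach = {x+v for x in reach} | {x*v for x in reach}
def pvStep (r : PySem.Set Int) (v : Int) : PySem.Set Int :=
  PySem.Set.union (PySem.Set.ofList (r.map (· + v))) (PySem.Set.ofList (r.map (· * v)))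

-- on vs = [] Python B raises IndexError (vs[0]) — excluded by Pre_
def equal_to_goal_alt (goal : Int) (vs : List Int) : Bool :=
  match vs with
  | [] => false
  | v0 :: rest =>
      PySem.Set.contains ((rest).foldl pvStep (PySem.Set.ofList [v0])) goal

-- ===== PRECONDITION & SPEC =====
-- Pre_ excludes only vs = [], where both Pythons raise IndexError
def Pre_equal_to_goal (goal : Int) (vs : List Int) : Prop := vs ≠ []
instance (goal : Int) (vs : List Int) : Decidable (Pre_equal_to_goal goal vs) := by unfold Pre_equal_to_goal; infer_instance
def pvWitness_equal_to_goal : Int × List Int := (5, [2, 3])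

def Spec_equal_to_goal (goal : Int) (vs : List Int) (out : Bool) : Prop := out = equal_to_goal_alt goal vs
instance (goal : Int) (vs : List Int) (out : Bool) : Decidable (Spec_equal_to_goal goal vs out) := by unfold Spec_equal_to_goal; infer_instance

-- ===== CLAIM (what is proved, stated in full; the proofs are below) =====
def Claim_equal_equal_to_goal : Prop := ∀ (goal : Int) (vs : List Int), Dom_equal_to_goal goal vs → Pre_equal_to_goal goal vs → Spec_equal_to_goal goal vs (equal_to_goal goal vs)

-- ===== LEMMAS AND PROOFS =====
theorem mem_pvStep (r : PySem.Set Int) (v y : Int) :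
    y ∈ pvStep r v ↔ ∃ x ∈ r, y = x + v ∨ y = x * v := by
  simp only [pvStep, PySem.Set.mem_union, PySem.Set.mem_ofList, List.mem_map]
  constructor
  · rintro (⟨x, hx, rfl⟩ | ⟨x, hx, rfl⟩)
    · exact ⟨x, hx, Or.inl rfl⟩
    · exact ⟨x, hx, Or.inr rfl⟩
  · rintro ⟨x, hx, rfl | rfl⟩
    · exact Or.inl ⟨x, hx, rfl⟩
    · exact Or.inr ⟨x, hx, rfl⟩

theorem reach_iff (goal : Int) (rest : List Int) :
    ∀ r : PySem.Set Int,
      (goal ∈ rest.foldl pvStep r ↔ ∃ x ∈ r, equal_to_goal goal (x :: rest) = true) := by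
  induction rest with
  | nil =>
      intro r
      simp [equal_to_goal]
  | cons v rest ih =>
      intro r
      rw [List.foldl_cons, ih (pvStep r v)]
      constructor
      · rintro ⟨y, hy, hA⟩
        obtain ⟨x, hx, rfl | rfl⟩ := (mem_pvStep r v y).1 hy
        · exact ⟨x, hx, by simp [equal_to_goal, hA]⟩
        · exact ⟨x, hx, by simp [equal_to_goal, hA]⟩
      · rintro ⟨x, hx, hA⟩
        rw [show equal_to_goal goal (x :: v :: rest)
              = (equal_to_goal goal ((x + v) :: rest) || equal_to_goal goal ((x * v) :: rest))
            from by simp [equal_to_goal], Bool.or_eq_true] at hA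
        rcases hA with h | h
        · exact ⟨x + v, (mem_pvStep r v _).2 ⟨x, hx, Or.inl rfl⟩, h⟩
        · exact ⟨x * v, (mem_pvStep r v _).2 ⟨x, hx, Or.inr rfl⟩, h⟩

-- ===== VERDICT (by name: the statement is the Claim_ definition above) =====
theorem equal_to_goal_spec : Claim_equal_equal_to_goal := by
  intro goal vs _ hpre
  match vs with
  | [] => exact absurd rfl hpre
  | v0 :: rest =>
      show equal_to_goal goal (v0 :: rest) = equal_to_goal_alt goal (v0 :: rest)
      rw [Bool.eq_iff_iff]
      have h := reach_iff goal rest (PySem.Set.ofList [v0])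
      simp only [PySem.Set.mem_ofList, List.mem_singleton] at h
      simp only [equal_to_goal_alt, PySem.Set.contains_iff, h]
      constructor
      · intro hA; exact ⟨v0, rfl, hA⟩
      · rintro ⟨x, rfl, hA⟩; exact hA
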